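-- pv_equiv track=rewrite | github.com/NoOneHardy/solitaire-bot | main.py | getCardName
-- ===== SOURCE A (Python) =====
-- def getCardName(card, eck, kreuz, herz, schaufel):
--     for i in range (len(kreuz)):
--         if card == kreuz[i]:
--             if i == 0:
--                 card = 'Kreuz Ass'
--             elif i == 10:
--                 card = 'Kreuz Bauer'
--             elif i == 11:
--                 card = 'Kreuz Dame'
--             elif i == 12:
--                 card = 'Kreuz König'
--             else:
--                 card = 'Kreuz ' + str(i + 1)
--
--         elif card == herz[i]:
--             if i == 0:
--                 card = 'Herz Ass'
--             elif i == 10: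
--                 card = 'Herz Bauer'
--             elif i == 11:
--                 card = 'Herz Dame'
--             elif i == 12:
--                 card = 'Herz König'
--             else:
--                 card = 'Herz ' + str(i + 1)
--         elif card == eck[i]:
--             if i == 0:
--                 card = 'Eck Ass'
--             elif i == 10:
--                 card = 'Eck Bauer'
--             elif i == 11:
--                 card = 'Eck Dame'
--             elif i == 12:
--                 card = 'Eck König'
--             else:
--                 card = 'Eck ' + str(i + 1)
--         elif card == schaufel[i]:
--             if i == 0:
--                 card = 'Schaufel Ass'
--             elif i == 10:
--                 card = 'Schaufel Bauer'
--             elif i == 11: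
--                 card = 'Schaufel Dame'
--             elif i == 12:
--                 card = 'Schaufel König'
--             else:
--                 card = 'Schaufel ' + str(i + 1)
--
--
--
--     return card
-- ===== SOURCE B (Python) =====
-- def getCardName(card, eck, kreuz, herz, schaufel):
--     ranks = {0: 'Ass', 10: 'Bauer', 11: 'Dame', 12: 'König'}
--     table = {}
--     for i in range(len(kreuz)):
--         rank = ranks.get(i, str(i + 1))
--         for suit, pile in (('Kreuz', kreuz), ('Herz', herz), ('Eck', eck), ('Schaufel', schaufel)):
--             table.setdefault(pile[i], suit + ' ' + rank)
--     return table.get(card, card)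
-- ===== Notes on version B (the rewrite author's own statement) =====
-- stated objective: simpler
-- what changed: Replaces the four copy-pasted elif blocks that mutate the loop variable with one table built once (index-outer, suit-inner, setdefault so the first scan-order match wins) plus a tiny rank dictionary, finishing with a single table.get lookup.
-- outside the precondition, e.g. on getCardName(5, [], [5], [], []): A returns 'Kreuz Ass', B raises IndexError; on getCardName(7, [1], [1], [1], [1]): A returns 7, B returns 7
import Mathlib
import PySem

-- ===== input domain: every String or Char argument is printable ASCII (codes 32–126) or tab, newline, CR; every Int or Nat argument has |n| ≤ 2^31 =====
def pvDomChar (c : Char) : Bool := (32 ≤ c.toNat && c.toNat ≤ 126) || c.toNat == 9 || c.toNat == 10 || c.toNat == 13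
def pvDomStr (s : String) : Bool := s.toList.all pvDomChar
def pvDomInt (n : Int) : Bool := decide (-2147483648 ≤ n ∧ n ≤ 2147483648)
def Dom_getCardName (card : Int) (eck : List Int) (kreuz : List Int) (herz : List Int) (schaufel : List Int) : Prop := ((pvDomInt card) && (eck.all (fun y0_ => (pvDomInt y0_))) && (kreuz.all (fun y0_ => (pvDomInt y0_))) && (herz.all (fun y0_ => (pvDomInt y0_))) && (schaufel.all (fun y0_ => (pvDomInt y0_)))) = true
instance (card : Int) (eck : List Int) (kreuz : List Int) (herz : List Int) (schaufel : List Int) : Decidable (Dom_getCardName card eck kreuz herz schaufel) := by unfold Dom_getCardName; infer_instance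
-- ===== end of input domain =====

-- B replaces A's four copy-pasted elif blocks (which mutate the loop variable) by a name table
-- built once with setdefault and a final single lookup; objective: simpler. Equal cost, O(n).

-- ===== PORT A =====
-- A's loop body: the running `card` variable starts as an Int and, on the first match, becomes a
-- String (later int comparisons against a string are False in Python), so the state is Int ⊕ String.
-- List indexing kreuz[i] etc. is in range under Pre_ (ports use getD 0 outside it; nothing is claimed there).
def pvStepA (eck kreuz herz schaufel : List Int) (c : Int ⊕ String) (i : Nat) : Int ⊕ String :=
  match c with
  | .inr s => .inr s
  | .inl v =>
    if v = kreuz.getD i 0 then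
      .inr (if i = 0 then "Kreuz Ass" else if i = 10 then "Kreuz Bauer"
            else if i = 11 then "Kreuz Dame" else if i = 12 then "Kreuz König"
            else "Kreuz " ++ PySem.Int.toStr ((i : Int) + 1))
    else if v = herz.getD i 0 then
      .inr (if i = 0 then "Herz Ass" else if i = 10 then "Herz Bauer"
            else if i = 11 then "Herz Dame" else if i = 12 then "Herz König"
            else "Herz " ++ PySem.Int.toStr ((i : Int) + 1))
    else if v = eck.getD i 0 then
      .inr (if i = 0 then "Eck Ass" else if i = 10 then "Eck Bauer"
            else if i = 11 then "Eck Dame" else if i = 12 then "Eck König"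
            else "Eck " ++ PySem.Int.toStr ((i : Int) + 1))
    else if v = schaufel.getD i 0 then
      .inr (if i = 0 then "Schaufel Ass" else if i = 10 then "Schaufel Bauer"
            else if i = 11 then "Schaufel Dame" else if i = 12 then "Schaufel König"
            else "Schaufel " ++ PySem.Int.toStr ((i : Int) + 1))
    else .inl v

def getCardName (card : Int) (eck : List Int) (kreuz : List Int) (herz : List Int) (schaufel : List Int) : String :=
  match (List.range kreuz.length).foldl (pvStepA eck kreuz herz schaufel) (.inl card) with
  | .inr s => s
  | .inl v => PySem.Int.toStr v   -- Python returns the unmatched int here; outside Pre_ (not a String)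

-- ===== PORT B =====
def pvRanks : PySem.Dict Nat String :=
  PySem.Dict.ofList [(0, "Ass"), (10, "Bauer"), (11, "Dame"), (12, "König")]

def pvStepB (eck kreuz herz schaufel : List Int) (t : PySem.Dict Int String) (i : Nat) : PySem.Dict Int String :=
  let rank := pvRanks.getD i (PySem.Int.toStr ((i : Int) + 1))
  [("Kreuz", kreuz), ("Herz", herz), ("Eck", eck), ("Schaufel", schaufel)].foldl
    (fun t p => t.setdefault (p.2.getD i 0) (p.1 ++ " " ++ rank)) t

def getCardName_alt (card : Int) (eck : List Int) (kreuz : List Int) (herz : List Int) (schaufel : List Int) : String :=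
  let table := (List.range kreuz.length).foldl (pvStepB eck kreuz herz schaufel) PySem.Dict.empty
  match table.get? card with
  | some s => s
  | none => PySem.Int.toStr card   -- Python's table.get(card, card): the unmatched int, outside Pre_

-- ===== PRECONDITION & SPEC =====
-- Pre_ excludes (a) ragged decks where one of herz/eck/schaufel is shorter than kreuz — A raises
-- IndexError except when a short-circuit match happens to return first, where B raises — and
-- (b) inputs whose card matches no list entry, on which A returns the int card itself, which is
-- not a value of the declared String return type.
def Pre_getCardName (card : Int) (eck : List Int) (kreuz : List Int) (herz : List Int) (schaufel : List Int) : Prop :=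
  kreuz.length ≤ eck.length ∧ kreuz.length ≤ herz.length ∧ kreuz.length ≤ schaufel.length ∧
  (card ∈ kreuz ∨ card ∈ herz.take kreuz.length ∨ card ∈ eck.take kreuz.length ∨ card ∈ schaufel.take kreuz.length)
instance (card : Int) (eck : List Int) (kreuz : List Int) (herz : List Int) (schaufel : List Int) : Decidable (Pre_getCardName card eck kreuz herz schaufel) := by unfold Pre_getCardName; infer_instance

def pvWitness_getCardName : Int × List Int × List Int × List Int × List Int :=
  (3, [4], [3], [5], [6])

def Spec_getCardName (card : Int) (eck : List Int) (kreuz : List Int) (herz : List Int) (schaufel : List Int) (out : String) : Prop := out = getCardName_alt card eck kreuz herz schaufel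
instance (card : Int) (eck : List Int) (kreuz : List Int) (herz : List Int) (schaufel : List Int) (out : String) : Decidable (Spec_getCardName card eck kreuz herz schaufel out) := by unfold Spec_getCardName; infer_instance

-- ===== CLAIM (what is proved, stated in full; the proofs are below) =====
def Claim_equal_getCardName : Prop := ∀ (card : Int) (eck : List Int) (kreuz : List Int) (herz : List Int) (schaufel : List Int), Dom_getCardName card eck kreuz herz schaufel → Pre_getCardName card eck kreuz herz schaufel → Spec_getCardName card eck kreuz herz schaufel (getCardName card eck kreuz herz schaufel)

-- ===== LEMMAS AND PROOFS =====

-- B's table state corresponds to A's running-card state at the fixed lookup key `card`.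
def pvConv (card : Int) (d : PySem.Dict Int String) : Int ⊕ String :=
  match d.get? card with
  | some s => .inr s
  | none => .inl card

theorem pv_get?_setdefault_mono {d : PySem.Dict Int String} {x k : Int} {s v : String}
    (h : d.get? x = some s) : (d.setdefault k v).get? x = some s := by
  by_cases hx : x = k
  · subst hx
    rw [PySem.Dict.get?_setdefault_self, h]
    rfl
  · rw [PySem.Dict.get?_setdefault_of_ne _ _ hx, h]

theorem pv_get?_setdefault_none {d : PySem.Dict Int String} {x k : Int} {v : String}
    (h : d.get? x = none) (hx : x ≠ k) : (d.setdefault k v).get? x = none := by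
  rw [PySem.Dict.get?_setdefault_of_ne _ _ hx, h]

theorem pv_get?_setdefault_hit {d : PySem.Dict Int String} {k : Int} {v : String}
    (h : d.get? k = none) : (d.setdefault k v).get? k = some v := by
  rw [PySem.Dict.get?_setdefault_self, h]
  rfl

-- the rank table of B names exactly the ranks A spells out branch by branch
theorem pv_ranks_getD_of_ne (i : Nat) (h0 : ¬ i = 0) (h10 : ¬ i = 10) (h11 : ¬ i = 11)
    (h12 : ¬ i = 12) (dflt : String) : pvRanks.getD i dflt = dflt := by
  have h0' : (0 == i) = false := by simp [Ne.symm h0]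
  have h10' : (10 == i) = false := by simp [Ne.symm h10]
  have h11' : (11 == i) = false := by simp [Ne.symm h11]
  have h12' : (12 == i) = false := by simp [Ne.symm h12]
  have hi : pvRanks.items = [(0, "Ass"), (10, "Bauer"), (11, "Dame"), (12, "König")] := by decide
  simp [PySem.Dict.getD, PySem.Dict.get?, hi, List.find?, h0', h10', h11', h12']

theorem pv_rank_name (S Sp a b c d : String) (ha : a = S ++ " " ++ "Ass")
    (hb : b = S ++ " " ++ "Bauer") (hc : c = S ++ " " ++ "Dame") (hd : d = S ++ " " ++ "König")
    (hSp : Sp = S ++ " ") (i : Nat) :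
    (if i = 0 then a else if i = 10 then b else if i = 11 then c else if i = 12 then d
     else Sp ++ PySem.Int.toStr ((i : Int) + 1))
    = S ++ " " ++ pvRanks.getD i (PySem.Int.toStr ((i : Int) + 1)) := by
  split_ifs with h0 h10 h11 h12
  · subst h0
    rw [ha, show ∀ x, pvRanks.getD 0 x = "Ass" from fun x => by
      rw [show pvRanks.getD 0 x = (pvRanks.get? 0).getD x from rfl,
          show pvRanks.get? 0 = some "Ass" from by decide]; rfl]
  · subst h10
    rw [hb, show ∀ x, pvRanks.getD 10 x = "Bauer" from fun x => by
      rw [show pvRanks.getD 10 x = (pvRanks.get? 10).getD x from rfl,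
          show pvRanks.get? 10 = some "Bauer" from by decide]; rfl]
  · subst h11
    rw [hc, show ∀ x, pvRanks.getD 11 x = "Dame" from fun x => by
      rw [show pvRanks.getD 11 x = (pvRanks.get? 11).getD x from rfl,
          show pvRanks.get? 11 = some "Dame" from by decide]; rfl]
  · subst h12
    rw [hd, show ∀ x, pvRanks.getD 12 x = "König" from fun x => by
      rw [show pvRanks.getD 12 x = (pvRanks.get? 12).getD x from rfl,
          show pvRanks.get? 12 = some "König" from by decide]; rfl]
  · rw [pv_ranks_getD_of_ne i h0 h10 h11 h12, hSp]

theorem pv_step_conv (card : Int) (eck kreuz herz schaufel : List Int) (i : Nat)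
    (d : PySem.Dict Int String) :
    pvStepA eck kreuz herz schaufel (pvConv card d) i
      = pvConv card (pvStepB eck kreuz herz schaufel d i) := by
  have hK := pv_rank_name "Kreuz" "Kreuz " "Kreuz Ass" "Kreuz Bauer" "Kreuz Dame" "Kreuz König"
    (by decide) (by decide) (by decide) (by decide) (by decide) i
  have hH := pv_rank_name "Herz" "Herz " "Herz Ass" "Herz Bauer" "Herz Dame" "Herz König"
    (by decide) (by decide) (by decide) (by decide) (by decide) i
  have hE := pv_rank_name "Eck" "Eck " "Eck Ass" "Eck Bauer" "Eck Dame" "Eck König"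
    (by decide) (by decide) (by decide) (by decide) (by decide) i
  have hS := pv_rank_name "Schaufel" "Schaufel " "Schaufel Ass" "Schaufel Bauer" "Schaufel Dame"
    "Schaufel König" (by decide) (by decide) (by decide) (by decide) (by decide) i
  simp only [pvStepB, List.foldl]
  unfold pvConv
  cases hd : d.get? card with
  | some s =>
    simp only [pvStepA]
    rw [pv_get?_setdefault_mono (pv_get?_setdefault_mono (pv_get?_setdefault_mono
        (pv_get?_setdefault_mono hd)))]
  | none =>
    simp only [pvStepA]
    by_cases hk : card = kreuz.getD i 0
    · subst hk
      rw [if_pos rfl,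
        pv_get?_setdefault_mono (pv_get?_setdefault_mono (pv_get?_setdefault_mono
          (pv_get?_setdefault_hit hd))), hK]
    · rw [if_neg hk]
      have h1 : ((d.setdefault (kreuz.getD i 0)
          ("Kreuz" ++ " " ++ pvRanks.getD i (PySem.Int.toStr ((i : Int) + 1)))).get? card) = none :=
        pv_get?_setdefault_none hd hk
      by_cases hh : card = herz.getD i 0
      · subst hh
        rw [if_pos rfl,
          pv_get?_setdefault_mono (pv_get?_setdefault_mono (pv_get?_setdefault_hit h1)), hH]
      · rw [if_neg hh]
        have h2 : (((d.setdefault (kreuz.getD i 0)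
            ("Kreuz" ++ " " ++ pvRanks.getD i (PySem.Int.toStr ((i : Int) + 1)))).setdefault
            (herz.getD i 0) ("Herz" ++ " " ++ pvRanks.getD i (PySem.Int.toStr ((i : Int) + 1)))).get?
            card) = none :=
          pv_get?_setdefault_none h1 hh
        by_cases he : card = eck.getD i 0
        · subst he
          rw [if_pos rfl, pv_get?_setdefault_mono (pv_get?_setdefault_hit h2), hE]
        · rw [if_neg he]
          have h3 : ((((d.setdefault (kreuz.getD i 0)
              ("Kreuz" ++ " " ++ pvRanks.getD i (PySem.Int.toStr ((i : Int) + 1)))).setdefault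
              (herz.getD i 0) ("Herz" ++ " " ++ pvRanks.getD i (PySem.Int.toStr ((i : Int) + 1)))).setdefault
              (eck.getD i 0) ("Eck" ++ " " ++ pvRanks.getD i (PySem.Int.toStr ((i : Int) + 1)))).get?
              card) = none :=
            pv_get?_setdefault_none h2 he
          by_cases hs : card = schaufel.getD i 0
          · subst hs
            rw [if_pos rfl, pv_get?_setdefault_hit h3, hS]
          · rw [if_neg hs]
            rw [pv_get?_setdefault_none h3 hs]

theorem pv_fold_conv (card : Int) (eck kreuz herz schaufel : List Int) :
    ∀ (l : List Nat) (d : PySem.Dict Int String),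
      l.foldl (pvStepA eck kreuz herz schaufel) (pvConv card d)
        = pvConv card (l.foldl (pvStepB eck kreuz herz schaufel) d) := by
  intro l
  induction l with
  | nil => intro d; rfl
  | cons i l ih =>
    intro d
    simp only [List.foldl]
    rw [pv_step_conv, ih]

-- ===== VERDICT (by name: the statement is the Claim_ definition above) =====
theorem getCardName_spec : Claim_equal_getCardName := by
  intro card eck kreuz herz schaufel _ _
  unfold Spec_getCardName getCardName getCardName_alt
  rw [show (Sum.inl card : Int ⊕ String) = pvConv card PySem.Dict.empty from rfl, pv_fold_conv]
  cases h : ((List.range kreuz.length).foldl (pvStepB eck kreuz herz schaufel)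
      PySem.Dict.empty).get? card <;> simp [pvConv, h]
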